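-- pv_equiv track=rewrite | github.com/000wan/problem-solving | math/15106.py | SOD
-- ===== SOURCE A (Python) =====
-- def SOD(n):
--     res = 0;
--     i = 1
--     j = 1
--
--     while i <= n:
--         j = n//(n//i)
--         res += (n//i) * (((i+j) * (j-i+1)) // 2)
--         i = j+1
--
--     return res
-- ===== SOURCE B (Python) =====
-- def SOD(n):
--     # Dirichlet hyperbola method: SOD(n) = sum over pairs (i, j) with i*j <= n of i.
--     # Split at K = floor(sqrt(n)): count i <= K directly, and i > K via columns j <= K
--     # using triangular numbers T(m) = m*(m+1)//2.
--     k = 0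
--     while (k + 1) * (k + 1) <= n:
--         k += 1
--     s = 0
--     for i in range(1, k + 1):
--         q = n // i
--         s += i * q + q * (q + 1) // 2
--     return s - k * k * (k + 1) // 2
-- ===== Notes on version B (the rewrite author's own statement) =====
-- stated objective: alternative
-- what changed: Replaced A's quotient-block traversal (j = n//(n//i) with a per-block Gauss sum) by the Dirichlet hyperbola method: one loop up to K = floor(sqrt(n)) accumulating i*(n//i) plus the triangular number T(n//i), corrected by K*T(K).
import Mathlib
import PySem

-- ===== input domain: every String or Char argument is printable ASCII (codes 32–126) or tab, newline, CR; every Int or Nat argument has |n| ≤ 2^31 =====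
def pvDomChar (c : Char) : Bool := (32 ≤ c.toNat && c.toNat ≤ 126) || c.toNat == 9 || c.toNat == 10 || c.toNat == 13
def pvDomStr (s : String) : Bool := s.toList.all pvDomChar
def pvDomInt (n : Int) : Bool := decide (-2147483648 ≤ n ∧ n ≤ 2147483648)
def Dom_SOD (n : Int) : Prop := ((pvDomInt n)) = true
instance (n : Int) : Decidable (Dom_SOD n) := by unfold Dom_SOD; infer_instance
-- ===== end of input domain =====

-- B replaces A's quotient-block traversal by the Dirichlet hyperbola method (loop to ⌊√n⌋ with triangular numbers).

-- ===== PORT A =====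
-- While loop of A; the extra '1 ≤ i' conjunct is a totality guard only: the loop is
-- entered with i = 1 and i only increases, so it never changes the computed value.
def SODloopA (n i res : Int) : Int :=
  if h : i ≤ n ∧ 1 ≤ i then
    let j := PySem.Int.floordiv n (PySem.Int.floordiv n i)
    SODloopA n (j + 1) (res + (PySem.Int.floordiv n i) * PySem.Int.floordiv ((i + j) * (j - i + 1)) 2)
  else res
termination_by (n + 1 - i).toNat
decreasing_by
  have h1 := h.1; have h2 := h.2
  have hq : 1 ≤ PySem.Int.floordiv n i := by
    rw [PySem.Int.le_floordiv_iff_mul_le (by omega)]; omega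
  have hqi := (PySem.Int.floordiv_eq_iff_of_pos (a := n) (b := i) (by omega)).mp rfl
  have hij : i ≤ PySem.Int.floordiv n (PySem.Int.floordiv n i) := by
    rw [PySem.Int.le_floordiv_iff_mul_le (by omega)]
    calc i * PySem.Int.floordiv n i = PySem.Int.floordiv n i * i := by ring
    _ ≤ n := hqi.1
  omega

def SOD (n : Int) : Int :=
  SODloopA n 1 0

-- ===== PORT B =====
-- B's first while loop: k = 0; while (k+1)*(k+1) <= n: k += 1.  The '0 ≤ k' conjunct
-- is a totality guard only: the loop starts at k = 0 and k only increases.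
def sqrtLoopB (n k : Int) : Int :=
  if h : 0 ≤ k ∧ (k + 1) * (k + 1) ≤ n then sqrtLoopB n (k + 1) else k
termination_by (n - k).toNat
decreasing_by
  have h1 := h.1; have h2 := h.2
  have : k + 1 ≤ n := by nlinarith
  omega

def SOD_alt (n : Int) : Int :=
  let k := sqrtLoopB n 0
  ((PySem.List.pyRange 1 (k + 1) 1).foldl
    (fun s i =>
      let q := PySem.Int.floordiv n i
      s + (i * q + PySem.Int.floordiv (q * (q + 1)) 2)) 0)
  - PySem.Int.floordiv (k * k * (k + 1)) 2

-- ===== PRECONDITION & SPEC =====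
def Spec_SOD (n : Int) (out : Int) : Prop := out = SOD_alt n
instance (n : Int) (out : Int) : Decidable (Spec_SOD n out) := by unfold Spec_SOD; infer_instance

-- ===== CLAIM (what is proved, stated in full; the proofs are below) =====
def Claim_equal_SOD : Prop := ∀ (n : Int), Dom_SOD n → Spec_SOD n (SOD n)

-- ===== LEMMAS AND PROOFS =====

-- Gauss: twice the sum of the integers i..j.
theorem gauss_pyRange (i j : Int) (h : i ≤ j + 1) :
    2 * (PySem.List.pyRange i (j + 1) 1).sum = (i + j) * (j - i + 1) := by
  have hm : ∀ (m : Nat) (i : Int), i ≤ j + 1 → (j + 1 - i).toNat = m →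
      2 * (PySem.List.pyRange i (j + 1) 1).sum = (i + j) * (j - i + 1) := by
    intro m
    induction m with
    | zero =>
      intro i hi hz
      rw [PySem.List.pyRange_one_eq_nil (by omega)]
      have : j - i + 1 = 0 := by omega
      simp [this]
    | succ k ih =>
      intro i hi hz
      rw [PySem.List.pyRange_one_cons (by omega)]
      have hrec := ih (i + 1) (by omega) (by omega)
      simp only [List.sum_cons]
      linear_combination hrec
  exact hm (j + 1 - i).toNat i h rfl

-- On each block i..jb with jb = n//q, q = n//i, the quotient n//k is constant.
theorem block_const (n i k q jb : Int) (h1 : 1 ≤ i) (h2 : i ≤ n)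
    (hq' : PySem.Int.floordiv n i = q) (hj' : PySem.Int.floordiv n q = jb)
    (hk1 : i ≤ k) (hk2 : k ≤ jb) :
    PySem.Int.floordiv n k = q := by
  have hq : 1 ≤ q := by
    rw [← hq', PySem.Int.le_floordiv_iff_mul_le (by omega)]; omega
  have hqi := (PySem.Int.floordiv_eq_iff_of_pos (a := n) (b := i) (by omega)).mp hq'
  have hjq := (PySem.Int.floordiv_eq_iff_of_pos (a := n) (b := q) (by omega)).mp hj'
  rw [PySem.Int.floordiv_eq_iff_of_pos (by omega)]
  constructor
  · calc q * k ≤ q * jb := mul_le_mul_of_nonneg_left hk2 (by omega)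
    _ = jb * q := by ring
    _ ≤ n := hjq.1
  · calc n < (q + 1) * i := hqi.2
    _ ≤ (q + 1) * k := mul_le_mul_of_nonneg_left hk1 (by omega)

-- Loop invariant: SODloopA n i res adds the direct sum over i..n to res.
theorem loopA_eq (n : Int) :
    ∀ (m : Nat) (i res : Int), 1 ≤ i → (n + 1 - i).toNat = m →
      SODloopA n i res =
        res + ((PySem.List.pyRange i (n + 1) 1).map (fun k => k * PySem.Int.floordiv n k)).sum := by
  intro m
  induction m using Nat.strong_induction_on with
  | _ m ih =>
    intro i res hi hm
    rw [SODloopA]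
    by_cases hle : i ≤ n
    · simp only [hle, hi, and_self, dif_pos]
      obtain ⟨q, hq'⟩ : ∃ q, PySem.Int.floordiv n i = q := ⟨_, rfl⟩
      obtain ⟨jb, hj'⟩ : ∃ jb, PySem.Int.floordiv n q = jb := ⟨_, rfl⟩
      rw [hq', hj']
      have hq : 1 ≤ q := by
        rw [← hq', PySem.Int.le_floordiv_iff_mul_le (by omega)]; omega
      have hqi := (PySem.Int.floordiv_eq_iff_of_pos (a := n) (b := i) (by omega)).mp hq'
      have hjq := (PySem.Int.floordiv_eq_iff_of_pos (a := n) (b := q) (by omega)).mp hj'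
      have hij : i ≤ jb := by
        rw [← hj', PySem.Int.le_floordiv_iff_mul_le (by omega)]
        calc i * q = q * i := by ring
        _ ≤ n := hqi.1
      have hjn : jb ≤ n := by nlinarith [hjq.1]
      have hrec := ih (n + 1 - (jb + 1)).toNat (by omega) (jb + 1)
        (res + q * PySem.Int.floordiv ((i + jb) * (jb - i + 1)) 2) (by omega) rfl
      rw [hrec]
      rw [PySem.List.pyRange_one_append i (jb + 1) (n + 1) (by omega) (by omega),
        List.map_append, List.sum_append]
      have hblock : ((PySem.List.pyRange i (jb + 1) 1).map
            (fun k => k * PySem.Int.floordiv n k)).sum =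
          q * PySem.Int.floordiv ((i + jb) * (jb - i + 1)) 2 := by
        have hcongr : (PySem.List.pyRange i (jb + 1) 1).map
              (fun k => k * PySem.Int.floordiv n k) =
            (PySem.List.pyRange i (jb + 1) 1).map (fun k => k * q) := by
          apply List.map_congr_left
          intro k hkmem
          rw [PySem.List.mem_pyRange_one] at hkmem
          rw [block_const n i k q jb hi hle hq' hj' hkmem.1 (by omega)]
        rw [hcongr]
        have hg := gauss_pyRange i jb (by omega)
        have hfd : PySem.Int.floordiv ((i + jb) * (jb - i + 1)) 2 =
            (PySem.List.pyRange i (jb + 1) 1).sum := by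
          rw [PySem.Int.floordiv_eq_iff_of_pos (by omega)]; omega
        rw [hfd]
        have hid : (PySem.List.pyRange i (jb + 1) 1).map (fun k => k * q) =
            (PySem.List.pyRange i (jb + 1) 1).map (fun k => (fun x : Int => x) k * q) := rfl
        rw [hid, List.sum_map_mul_right]
        simp [mul_comm]
      rw [hblock]; ring
    · simp only [hle, false_and, dif_neg, not_false_iff]
      rw [PySem.List.pyRange_one_eq_nil (by omega)]
      simp

-- ---- B-side lemmas ----

-- twice the triangular number a*(a+1)//2 is a*(a+1)
theorem two_tri (a : Int) : 2 * PySem.Int.floordiv (a * (a + 1)) 2 = a * (a + 1) := by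
  obtain ⟨c, hc⟩ := Int.even_mul_succ_self a
  have : PySem.Int.floordiv (a * (a + 1)) 2 = c := by
    rw [PySem.Int.floordiv_eq_iff_of_pos (by omega)]; omega
  omega

-- the square-root loop computes ⌊√n⌋ for n ≥ 0
theorem sqrtLoopB_spec (n : Int) (hn : 0 ≤ n) :
    ∀ (m : Nat) (k : Int), 0 ≤ k → k * k ≤ n → (n - k).toNat = m →
      0 ≤ sqrtLoopB n k ∧ sqrtLoopB n k * sqrtLoopB n k ≤ n ∧
        n < (sqrtLoopB n k + 1) * (sqrtLoopB n k + 1) := by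
  intro m
  induction m using Nat.strong_induction_on with
  | _ m ih
  intro k hk0 hkk hm
  rw [sqrtLoopB]
  by_cases hcond : (k + 1) * (k + 1) ≤ n
  · rw [dif_pos ⟨hk0, hcond⟩]
    have hk1 : k + 1 ≤ n := by nlinarith
    exact ih (n - (k + 1)).toNat (by omega) (k + 1) (by omega) hcond rfl
  · rw [dif_neg (fun hco => hcond hco.2)]
    exact ⟨hk0, hkk, by omega⟩

-- exchanging two finite sums over lists
theorem list_sum_comm (l1 l2 : List Int) (g : Int → Int → Int) :
    (l1.map (fun i => (l2.map (fun j => g i j)).sum)).sum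
      = (l2.map (fun j => (l1.map (fun i => g i j)).sum)).sum := by
  induction l1 with
  | nil => simp
  | cons a l ih =>
    simp only [List.map_cons, List.sum_cons, ih, List.sum_cons]
    rw [← PySem.List.sum_map_add_int]

-- row expansion: for K < i ≤ n with n < (K+1)², i*(n//i) is the indicator sum over j ≤ K
theorem row_expand (n K i : Int) (hn : 0 ≤ n) (hK : 0 ≤ K) (hsq : n < (K + 1) * (K + 1))
    (hi1 : K + 1 ≤ i) (hi2 : i ≤ n) :
    i * PySem.Int.floordiv n i =
      ((PySem.List.pyRange 1 (K + 1) 1).map (fun j => if j * i ≤ n then i else 0)).sum := by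
  obtain ⟨q, hq'⟩ : ∃ q, PySem.Int.floordiv n i = q := ⟨_, rfl⟩
  have hipos : 1 ≤ i := by omega
  have hq0 : 0 ≤ q := by
    rw [← hq', PySem.Int.le_floordiv_iff_mul_le (by omega)]; omega
  have hqK : q ≤ K := by
    rw [← hq']
    have : PySem.Int.floordiv n i < K + 1 := by
      rw [PySem.Int.floordiv_lt_iff_lt_mul (by omega)]
      calc n < (K + 1) * (K + 1) := hsq
      _ ≤ (K + 1) * i := mul_le_mul_of_nonneg_left hi1 (by omega)
    omega
  rw [hq', PySem.List.pyRange_one_append 1 (q + 1) (K + 1) (by omega) (by omega),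
    List.map_append, List.sum_append]
  have hfirst : (PySem.List.pyRange 1 (q + 1) 1).map (fun j => if j * i ≤ n then i else 0)
      = (PySem.List.pyRange 1 (q + 1) 1).map (fun _ => i) := by
    apply List.map_congr_left
    intro j hj
    rw [PySem.List.mem_pyRange_one] at hj
    have : j * i ≤ n := by
      have : j ≤ PySem.Int.floordiv n i := by omega
      rw [PySem.Int.le_floordiv_iff_mul_le (by omega)] at this
      exact this
    simp [this]
  have hsecond : (PySem.List.pyRange (q + 1) (K + 1) 1).map (fun j => if j * i ≤ n then i else 0)
      = (PySem.List.pyRange (q + 1) (K + 1) 1).map (fun _ => (0 : Int)) := by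
    apply List.map_congr_left
    intro j hj
    rw [PySem.List.mem_pyRange_one] at hj
    have hnot : ¬ j * i ≤ n := by
      intro hle
      have : j ≤ PySem.Int.floordiv n i := by
        rw [PySem.Int.le_floordiv_iff_mul_le (by omega)]; exact hle
      omega
    simp [hnot]
  rw [hfirst, hsecond, PySem.List.sum_map_const_int, PySem.List.sum_map_const_int,
    PySem.List.length_pyRange_one, PySem.List.length_pyRange_one]
  have : ((q + 1 - 1).toNat : Int) = q := by omega
  rw [this]; ring

-- column sum: for 1 ≤ j ≤ K, the indicator sum over K < i ≤ n is T(n//j) - T(K)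
theorem col_sum (n K j : Int) (hn : 0 ≤ n) (hK : 0 ≤ K) (hKK : K * K ≤ n)
    (hsq : n < (K + 1) * (K + 1)) (hj1 : 1 ≤ j) (hj2 : j ≤ K) :
    ((PySem.List.pyRange (K + 1) (n + 1) 1).map (fun i => if j * i ≤ n then i else 0)).sum =
      PySem.Int.floordiv (PySem.Int.floordiv n j * (PySem.Int.floordiv n j + 1)) 2
        - PySem.Int.floordiv (K * (K + 1)) 2 := by
  obtain ⟨M, hM'⟩ : ∃ M, PySem.Int.floordiv n j = M := ⟨_, rfl⟩
  have hKM : K ≤ M := by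
    rw [← hM', PySem.Int.le_floordiv_iff_mul_le (by omega)]; nlinarith
  have hM0 : 0 ≤ M := by omega
  have hMj := (PySem.Int.floordiv_eq_iff_of_pos (a := n) (b := j) (by omega)).mp hM'
  have hMn : M ≤ n := by nlinarith [hMj.1]
  rw [hM', PySem.List.pyRange_one_append (K + 1) (M + 1) (n + 1) (by omega) (by omega),
    List.map_append, List.sum_append]
  have hfirst : (PySem.List.pyRange (K + 1) (M + 1) 1).map (fun i => if j * i ≤ n then i else 0)
      = (PySem.List.pyRange (K + 1) (M + 1) 1).map (fun i => i) := by
    apply List.map_congr_left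
    intro i hi
    rw [PySem.List.mem_pyRange_one] at hi
    have : j * i ≤ n := by
      have : i ≤ PySem.Int.floordiv n j := by omega
      rw [PySem.Int.le_floordiv_iff_mul_le (by omega)] at this
      calc j * i = i * j := by ring
      _ ≤ n := this
    simp [this]
  have hsecond : (PySem.List.pyRange (M + 1) (n + 1) 1).map (fun i => if j * i ≤ n then i else 0)
      = (PySem.List.pyRange (M + 1) (n + 1) 1).map (fun _ => (0 : Int)) := by
    apply List.map_congr_left
    intro i hi
    rw [PySem.List.mem_pyRange_one] at hi
    have hnot : ¬ j * i ≤ n := by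
      intro hle
      have : i ≤ PySem.Int.floordiv n j := by
        rw [PySem.Int.le_floordiv_iff_mul_le (by omega)]
        calc i * j = j * i := by ring
        _ ≤ n := hle
      omega
    simp [hnot]
  rw [hfirst, hsecond, List.map_id', PySem.List.sum_map_const_int]
  have hg := gauss_pyRange (K + 1) M (by omega)
  have h2M := two_tri M
  have h2K := two_tri K
  have h4 : 2 * (PySem.List.pyRange (K + 1) (M + 1) 1).sum =
      2 * PySem.Int.floordiv (M * (M + 1)) 2 - 2 * PySem.Int.floordiv (K * (K + 1)) 2 := by
    linear_combination hg - h2M + h2K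
  omega

-- B equals the direct sum Σ_{i=1..n} i*(n//i)
theorem alt_eq_direct (n : Int) :
    SOD_alt n = ((PySem.List.pyRange 1 (n + 1) 1).map (fun k => k * PySem.Int.floordiv n k)).sum := by
  by_cases hn : 0 ≤ n
  · obtain ⟨hK0, hKK, hsq⟩ := sqrtLoopB_spec n hn (n - 0).toNat 0 (by omega) (by omega) rfl
    obtain ⟨K, hKdef⟩ : ∃ K, sqrtLoopB n 0 = K := ⟨_, rfl⟩
    rw [hKdef] at hK0 hKK hsq
    have hKn : K ≤ n := by nlinarith
    simp only [SOD_alt, hKdef]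
    -- LHS: foldl to a sum of two maps
    rw [PySem.List.foldl_add]
    rw [PySem.List.sum_map_add_int]
    -- RHS: split the direct sum at K+1
    rw [PySem.List.pyRange_one_append 1 (K + 1) (n + 1) (by omega) (by omega),
      List.map_append, List.sum_append]
    -- tail of the direct sum = double indicator sum = column sums
    have htail : ((PySem.List.pyRange (K + 1) (n + 1) 1).map
          (fun k => k * PySem.Int.floordiv n k)).sum =
        ((PySem.List.pyRange 1 (K + 1) 1).map
          (fun j => PySem.Int.floordiv (PySem.Int.floordiv n j * (PySem.Int.floordiv n j + 1)) 2
            - PySem.Int.floordiv (K * (K + 1)) 2)).sum := by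
      have hrows : (PySem.List.pyRange (K + 1) (n + 1) 1).map
            (fun k => k * PySem.Int.floordiv n k) =
          (PySem.List.pyRange (K + 1) (n + 1) 1).map
            (fun i => ((PySem.List.pyRange 1 (K + 1) 1).map
              (fun j => if j * i ≤ n then i else 0)).sum) := by
        apply List.map_congr_left
        intro i hi
        rw [PySem.List.mem_pyRange_one] at hi
        exact row_expand n K i hn hK0 hsq hi.1 (by omega)
      rw [hrows, list_sum_comm]
      apply congrArg
      apply List.map_congr_left
      intro j hj
      rw [PySem.List.mem_pyRange_one] at hj
      exact col_sum n K j hn hK0 hKK hsq hj.1 (by omega)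
    rw [htail]
    -- Σ (T(n//j) - T(K)) = Σ T(n//j) - K*T(K)
    have hsplit : ((PySem.List.pyRange 1 (K + 1) 1).map
          (fun j => PySem.Int.floordiv (PySem.Int.floordiv n j * (PySem.Int.floordiv n j + 1)) 2
            - PySem.Int.floordiv (K * (K + 1)) 2)).sum =
        ((PySem.List.pyRange 1 (K + 1) 1).map
          (fun j => PySem.Int.floordiv (PySem.Int.floordiv n j * (PySem.Int.floordiv n j + 1)) 2)).sum
          + ((PySem.List.pyRange 1 (K + 1) 1).map
              (fun _ => -PySem.Int.floordiv (K * (K + 1)) 2)).sum := by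
      rw [← PySem.List.sum_map_add_int]
      apply congrArg
      apply List.map_congr_left
      intro j _
      ring
    rw [hsplit, PySem.List.sum_map_const_int, PySem.List.length_pyRange_one]
    have hlen : ((K + 1 - 1).toNat : Int) = K := by omega
    rw [hlen]
    -- K*K*(K+1)//2 = K * (K*(K+1)//2)
    have h2K := two_tri K
    have hKKK : PySem.Int.floordiv (K * K * (K + 1)) 2 = K * PySem.Int.floordiv (K * (K + 1)) 2 := by
      rw [PySem.Int.floordiv_eq_iff_of_pos (by omega)]
      constructor
      · nlinarith
      · nlinarith
    rw [hKKK]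
    ring
  · -- n < 0: both sides are 0
    have hK : sqrtLoopB n 0 = 0 := by
      rw [sqrtLoopB]
      have : ¬ ((0 : Int) ≤ 0 ∧ (0 + 1) * (0 + 1) ≤ n) := by omega
      rw [dif_neg this]
    have h1 : PySem.List.pyRange 1 (0 + 1) 1 = [] := PySem.List.pyRange_one_eq_nil (by omega)
    have h2 : PySem.List.pyRange 1 (n + 1) 1 = [] := PySem.List.pyRange_one_eq_nil (by omega)
    rw [h2]
    simp only [SOD_alt, hK]
    rw [h1]
    simp [PySem.Int.floordiv]

-- ===== VERDICT (by name: the statement is the Claim_ definition above) =====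
theorem SOD_spec : Claim_equal_SOD := by
  intro n _
  unfold Spec_SOD SOD
  rw [loopA_eq n (n + 1 - 1).toNat 1 0 (by omega) rfl, alt_eq_direct, zero_add]
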